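-- pv_equiv track=rewrite | github.com/MinhCreator/python_dev | source-code/HSG_exam/example for technical in python/chuyên đề kĩ thuật đánh dấu/bài 2.5 nhóm đề án/đề án.py | compess_group
-- ===== SOURCE A (Python) =====
-- def compess_group(num_mem: int, lst_mem: list) -> int:
--
--     # variables
--     num_group = 0
--     lst_group = [False] * len(lst_mem)
--
--     # mark members in group
--     for mem in range(len(lst_mem)):
--
--         if not lst_group[mem]:
--
--             lst_group[mem] = True
--             num_group += 1
--             limit = 1
--
--         # count group
--             for member in range(mem + 1, len(lst_mem)):
--
--                 if lst_mem[mem] == lst_mem[member]: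
--                     limit += 1
--
--                     if limit <= lst_mem[mem]:
--                         lst_group[member] = True
--
--     return num_group
-- ===== SOURCE B (Python) =====
-- def compess_group(num_mem: int, lst_mem: list) -> int:
--     # One pass: for each value keep how many upcoming equal members still fit
--     # in the currently open group; open a new group when that drops to zero.
--     remaining = {}
--     num_group = 0
--     for v in lst_mem:
--         left = remaining.get(v, 0)
--         if left == 0:
--             num_group += 1
--             remaining[v] = (v if v > 1 else 1) - 1
--         else:
--             remaining[v] = left - 1
--     return num_group
-- ===== Notes on version B (the rewrite author's own statement) =====
-- stated objective: faster
-- what changed: Replaced the quadratic mark-array with nested rescans by a single left-to-right pass keeping, per value, a dict counter of how many more equal members still fit in the open group.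
import Mathlib
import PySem

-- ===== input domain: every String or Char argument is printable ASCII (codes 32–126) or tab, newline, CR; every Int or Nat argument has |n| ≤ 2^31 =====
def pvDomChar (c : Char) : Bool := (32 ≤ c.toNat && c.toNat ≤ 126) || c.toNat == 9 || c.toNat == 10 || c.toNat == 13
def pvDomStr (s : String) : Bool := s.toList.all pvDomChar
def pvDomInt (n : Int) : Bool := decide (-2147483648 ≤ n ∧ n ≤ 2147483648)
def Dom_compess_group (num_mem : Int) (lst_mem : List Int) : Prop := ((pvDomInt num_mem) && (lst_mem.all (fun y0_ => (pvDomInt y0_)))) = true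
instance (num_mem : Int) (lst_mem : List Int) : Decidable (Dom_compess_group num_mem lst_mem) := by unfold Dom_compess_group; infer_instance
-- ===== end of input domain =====

-- B replaces A's quadratic mark-array with nested rescans by a single left-to-right
-- pass keeping a per-value counter dict (objective: faster, asymptotically).

-- ===== PORT A =====
-- Loop indices `mem`/`member` are naturals always within range, so `getD` is exact
-- Python list indexing here; `range(a, b)` over such indices is `List.range'`.
def compessInner (lst_mem : List Int) (mem : Nat) (st : Int × List Bool) (member : Nat) :
    Int × List Bool :=
  if lst_mem.getD mem 0 == lst_mem.getD member 0 then
    let limit := st.1 + 1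
    if limit ≤ lst_mem.getD mem 0 then (limit, st.2.set member true)
    else (limit, st.2)
  else st

def compessOuter (lst_mem : List Int) (st : Int × List Bool) (mem : Nat) : Int × List Bool :=
  if st.2.getD mem false then st
  else
    let lst_group := st.2.set mem true
    let inner := (List.range' (mem + 1) (lst_mem.length - (mem + 1))).foldl
        (compessInner lst_mem mem) (1, lst_group)
    (st.1 + 1, inner.2)

def compess_group (num_mem : Int) (lst_mem : List Int) : Int :=
  ((List.range lst_mem.length).foldl (compessOuter lst_mem)
    (0, List.replicate lst_mem.length false)).1

-- ===== PORT B =====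
def compessAltStep (st : Int × PySem.Dict Int Int) (v : Int) : Int × PySem.Dict Int Int :=
  let left := st.2.getD v 0
  if left == 0 then (st.1 + 1, st.2.insert v ((if v > 1 then v else 1) - 1))
  else (st.1, st.2.insert v (left - 1))

def compess_group_alt (num_mem : Int) (lst_mem : List Int) : Int :=
  (lst_mem.foldl compessAltStep (0, PySem.Dict.empty)).1

-- ===== PRECONDITION & SPEC =====
def Spec_compess_group (num_mem : Int) (lst_mem : List Int) (out : Int) : Prop := out = compess_group_alt num_mem lst_mem
instance (num_mem : Int) (lst_mem : List Int) (out : Int) : Decidable (Spec_compess_group num_mem lst_mem out) := by unfold Spec_compess_group; infer_instance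

-- ===== CLAIM (what is proved, stated in full; the proofs are below) =====
def Claim_equal_compess_group : Prop := ∀ (num_mem : Int) (lst_mem : List Int), Dom_compess_group num_mem lst_mem → Spec_compess_group num_mem lst_mem (compess_group num_mem lst_mem)

-- ===== LEMMAS AND PROOFS =====

theorem pvGetD_set_self {l : List Bool} {j : Nat} (h : j < l.length) (a d : Bool) :
    (l.set j a).getD j d = a := by
  simp [List.getD, List.getElem?_set, h]

theorem pvGetD_set_ne {l : List Bool} {i j : Nat} (h : j ≠ i) (a d : Bool) :
    (l.set j a).getD i d = l.getD i d := by
  simp [List.getD, List.getElem?_set, h]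

theorem pvCount_cons (a b : Int) (l : List Int) :
    (b :: l).count a = l.count a + (if a = b then 1 else 0) := by
  rw [List.count_cons]
  by_cases h : a = b
  · simp [h]
  · simp [h, Ne.symm h]

-- one more element of the window: count over `take (j+1)` of a drop
theorem pvCount_take_succ (l : List Int) (s j : Nat) (h : s + j < l.length) (a : Int) :
    ((l.drop s).take (j + 1)).count a
      = ((l.drop s).take j).count a + (if l.getD (s + j) 0 = a then 1 else 0) := by
  have hget : (l.drop s)[j]? = some (l.getD (s + j) 0) := by
    rw [List.getElem?_drop]
    simp [List.getD, List.getElem?_eq_getElem h]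
  rw [List.take_succ, hget]
  simp [List.count_append, List.count_singleton]

theorem compessInner_eq (L : List Int) (t : Nat) (lim : Int) (lg : List Bool) (j : Nat) :
    compessInner L t (lim, lg) j =
      if L.getD t 0 = L.getD j 0 then
        (if lim + 1 ≤ L.getD t 0 then (lim + 1, lg.set j true) else (lim + 1, lg))
      else (lim, lg) := by
  simp only [compessInner, beq_iff_eq]

-- the loop invariant tying A's boolean mark array to B's remaining-capacity dict:
-- index i ≥ t is marked iff it is among the first (remaining capacity of its value)
-- occurrences of its value at positions ≥ t; indices < t are all marked.
def pvInv (L : List Int) (t : Nat) (lg : List Bool) (d : PySem.Dict Int Int) : Prop :=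
  lg.length = L.length ∧
  (∀ x : Int, 0 ≤ d.getD x 0) ∧
  ∀ i, i < L.length →
    (lg.getD i false = true ↔
      (i < t ∨ ((((L.drop t).take (i - t)).count (L.getD i 0) : Int) < d.getD (L.getD i 0) 0)))

-- A's inner loop from position j marks exactly the occurrences of e = L[t] that lie
-- among the first (e - 1) occurrences of e after position t; earlier entries untouched.
theorem pvInner_spec (L : List Int) (t : Nat) :
    ∀ (k j : Nat) (lim : Int) (lg : List Bool),
    j + k = L.length → t + 1 ≤ j → lg.length = L.length →
    lim = 1 + (((L.drop (t+1)).take (j - (t+1))).count (L.getD t 0) : Int) →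
    (((List.range' j k).foldl (compessInner L t) (lim, lg)).2.length = L.length) ∧
    ∀ i, (i < j →
        ((List.range' j k).foldl (compessInner L t) (lim, lg)).2.getD i false
          = lg.getD i false) ∧
      (j ≤ i → i < L.length →
        ((List.range' j k).foldl (compessInner L t) (lim, lg)).2.getD i false
          = (lg.getD i false ||
            (if L.getD i 0 = L.getD t 0 then
              decide ((((L.drop (t+1)).take (i - (t+1))).count (L.getD t 0) : Int)
                < L.getD t 0 - 1)
             else false))) := by
  intro k
  induction k with
  | zero =>
    intro j lim lg hlen hj hlg hlim
    exact ⟨hlg, fun i => ⟨fun _ => rfl, fun h1 h2 => absurd h2 (by omega)⟩⟩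
  | succ k ih =>
    intro j lim lg hlen hj hlg hlim
    have hjL : j < L.length := by omega
    have hcnt : ((L.drop (t+1)).take ((j+1) - (t+1))).count (L.getD t 0)
        = ((L.drop (t+1)).take (j - (t+1))).count (L.getD t 0)
          + (if L.getD j 0 = L.getD t 0 then 1 else 0) := by
      have h1 : (j + 1) - (t + 1) = (j - (t + 1)) + 1 := by omega
      have h2 : (t + 1) + (j - (t + 1)) = j := by omega
      rw [h1, pvCount_take_succ L (t+1) (j - (t+1)) (by omega) (L.getD t 0), h2]
    rw [List.range'_succ, List.foldl_cons, compessInner_eq]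
    by_cases heq : L.getD t 0 = L.getD j 0
    · rw [if_pos heq]
      have hc1 : lim + 1
          = 1 + (((L.drop (t+1)).take ((j+1) - (t+1))).count (L.getD t 0) : Int) := by
        rw [hcnt, if_pos heq.symm]
        push_cast
        omega
      by_cases hle : lim + 1 ≤ L.getD t 0
      · rw [if_pos hle]
        obtain ⟨ihlen, ihspec⟩ := ih (j+1) (lim+1) (lg.set j true)
          (by omega) (by omega) (by simpa using hlg) hc1
        refine ⟨ihlen, fun i => ⟨?_, ?_⟩⟩
        · intro hij
          rw [(ihspec i).1 (by omega), pvGetD_set_ne (by omega) true false]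
        · intro h1 h2
          by_cases hi : i = j
          · subst hi
            rw [(ihspec i).1 (by omega), pvGetD_set_self (by rw [hlg]; exact h2) true false,
              if_pos heq.symm]
            have hdec : (((L.drop (t+1)).take (i - (t+1))).count (L.getD t 0) : Int)
                < L.getD t 0 - 1 := by omega
            rw [decide_eq_true hdec, Bool.or_true]
          · rw [(ihspec i).2 (by omega) h2, pvGetD_set_ne (by omega) true false]
      · rw [if_neg hle]
        obtain ⟨ihlen, ihspec⟩ := ih (j+1) (lim+1) lg (by omega) (by omega) hlg hc1
        refine ⟨ihlen, fun i => ⟨?_, ?_⟩⟩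
        · intro hij
          exact (ihspec i).1 (by omega)
        · intro h1 h2
          by_cases hi : i = j
          · subst hi
            rw [(ihspec i).1 (by omega), if_pos heq.symm]
            have hdec : ¬ ((((L.drop (t+1)).take (i - (t+1))).count (L.getD t 0) : Int)
                < L.getD t 0 - 1) := by omega
            rw [decide_eq_false hdec, Bool.or_false]
          · exact (ihspec i).2 (by omega) h2
    · rw [if_neg heq]
      have hc0 : lim
          = 1 + (((L.drop (t+1)).take ((j+1) - (t+1))).count (L.getD t 0) : Int) := by
        rw [hcnt, if_neg (fun h => heq h.symm)]
        push_cast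
        omega
      obtain ⟨ihlen, ihspec⟩ := ih (j+1) lim lg (by omega) (by omega) hlg hc0
      refine ⟨ihlen, fun i => ⟨?_, ?_⟩⟩
      · intro hij
        exact (ihspec i).1 (by omega)
      · intro h1 h2
        by_cases hi : i = j
        · subst hi
          rw [(ihspec i).1 (by omega), if_neg (fun h => heq h.symm), Bool.or_false]
        · exact (ihspec i).2 (by omega) h2

-- main simulation: A's remaining outer iterations from t match B's fold over L.drop t
theorem pvMain (L : List Int) :
    ∀ (k t : Nat) (g : Int) (lg : List Bool) (d : PySem.Dict Int Int),
    t + k = L.length → pvInv L t lg d →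
    ((List.range' t k).foldl (compessOuter L) (g, lg)).1
      = ((L.drop t).foldl compessAltStep (g, d)).1 := by
  intro k
  induction k with
  | zero =>
    intro t g lg d hlen _
    have hnil : L.drop t = [] := by
      apply List.drop_of_length_le
      omega
    simp [hnil]
  | succ k ih =>
    intro t g lg d hlen hinv
    obtain ⟨hlg, hpos, hiff⟩ := hinv
    have htL : t < L.length := by omega
    have hdrop : L.drop t = L.getD t 0 :: L.drop (t+1) := by
      rw [List.drop_eq_getElem_cons htL]
      simp [List.getD, List.getElem?_eq_getElem htL]
    have hmarkt : lg.getD t false = true ↔ 0 < d.getD (L.getD t 0) 0 := by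
      have h := hiff t htL
      simp only [Nat.sub_self, List.take_zero, List.count_nil, Nat.cast_zero,
        lt_self_iff_false, false_or] at h
      exact h
    rw [List.range'_succ, List.foldl_cons, hdrop, List.foldl_cons]
    by_cases hleft : d.getD (L.getD t 0) 0 = 0
    · -- a new group is opened at t
      have hfalse : lg.getD t false = false := by
        cases h : lg.getD t false
        · rfl
        · exact absurd (hmarkt.mp h) (by omega)
      have hstepA : compessOuter L (g, lg) t
          = (g + 1, ((List.range' (t+1) (L.length - (t+1))).foldl (compessInner L t)
              (1, lg.set t true)).2) := by
        simp only [compessOuter]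
        rw [hfalse]
        simp
      have hstepB : compessAltStep (g, d) (L.getD t 0)
          = (g + 1, d.insert (L.getD t 0)
              ((if L.getD t 0 > 1 then L.getD t 0 else 1) - 1)) := by
        simp only [compessAltStep]
        rw [hleft]
        simp
      rw [hstepA, hstepB]
      obtain ⟨hlen', hspec⟩ := pvInner_spec L t (L.length - (t+1)) (t+1) 1 (lg.set t true)
        (by omega) (le_refl _) (by simpa using hlg) (by simp)
      apply ih (t+1) (g+1) _ _ (by omega)
      refine ⟨hlen', ?_, ?_⟩
      · intro x
        rw [PySem.Dict.getD_insert]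
        split_ifs with hx h1
        · omega
        · omega
        · exact hpos x
      · intro i hi
        by_cases hit : i < t + 1
        · by_cases hit' : i = t
          · subst hit'
            rw [(hspec i).1 (by omega), pvGetD_set_self (by rw [hlg]; exact htL) true false]
            exact ⟨fun _ => Or.inl (by omega), fun _ => rfl⟩
          · rw [(hspec i).1 (by omega), pvGetD_set_ne (by omega) true false]
            exact ⟨fun _ => Or.inl (by omega),
              fun _ => (hiff i hi).mpr (Or.inl (by omega))⟩
        · have hge : t + 1 ≤ i := by omega
          rw [(hspec i).2 hge hi, pvGetD_set_ne (by omega) true false,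
            PySem.Dict.getD_insert]
          by_cases hv : L.getD i 0 = L.getD t 0
          · -- same value as the newly opened group
            have hold : lg.getD i false = false := by
              cases h : lg.getD i false
              · rfl
              · exfalso
                rcases (hiff i hi).mp h with h' | h'
                · omega
                · rw [hv, hleft] at h'
                  have hnn := Int.natCast_nonneg
                    (((L.drop t).take (i - t)).count (L.getD t 0))
                  omega
            rw [hold, if_pos hv, Bool.false_or, if_pos hv, hv]
            have hnn := Int.natCast_nonneg
              (((L.drop (t+1)).take (i - (t+1))).count (L.getD t 0))
            constructor
            · intro h
              have hc := of_decide_eq_true h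
              right
              split_ifs with h1 <;> omega
            · rintro (h | h)
              · omega
              · apply decide_eq_true
                split_ifs at h with h1 <;> omega
          · -- a different value: untouched by this group
            have hcount : ((L.drop t).take (i - t)).count (L.getD i 0)
                = ((L.drop (t+1)).take (i - (t+1))).count (L.getD i 0) := by
              have h1 : i - t = (i - (t+1)) + 1 := by omega
              rw [h1, hdrop, List.take_succ_cons, pvCount_cons, if_neg hv, add_zero]
            have hthis := hiff i hi
            rw [hcount] at hthis
            rw [if_neg hv, Bool.or_false, hthis, if_neg hv]
            constructor
            · rintro (h | h)
              · exact absurd h (by omega)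
              · exact Or.inr h
            · rintro (h | h)
              · exact absurd h (by omega)
              · exact Or.inr h
    · -- t joins the currently open group of its value
      have hlpos : 0 < d.getD (L.getD t 0) 0 := lt_of_le_of_ne (hpos _) (Ne.symm hleft)
      have htrue : lg.getD t false = true := hmarkt.mpr hlpos
      have hstepA : compessOuter L (g, lg) t = (g, lg) := by
        simp only [compessOuter]
        rw [htrue]
        simp
      have hbeq : (d.getD (L.getD t 0) 0 == (0 : Int)) = false := by
        simpa using hleft
      have hstepB : compessAltStep (g, d) (L.getD t 0)
          = (g, d.insert (L.getD t 0) (d.getD (L.getD t 0) 0 - 1)) := by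
        simp only [compessAltStep, hbeq]
        simp
      rw [hstepA, hstepB]
      apply ih (t+1) g _ _ (by omega)
      refine ⟨hlg, ?_, ?_⟩
      · intro x
        rw [PySem.Dict.getD_insert]
        split_ifs with hx
        · omega
        · exact hpos x
      · intro i hi
        rw [PySem.Dict.getD_insert]
        by_cases hit : i < t + 1
        · constructor
          · intro _
            exact Or.inl hit
          · intro _
            by_cases hit' : i = t
            · subst hit'
              exact htrue
            · exact (hiff i hi).mpr (Or.inl (by omega))
        · have hge : t + 1 ≤ i := by omega
          have hthis := hiff i hi
          by_cases hv : L.getD i 0 = L.getD t 0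
          · have hcount : ((L.drop t).take (i - t)).count (L.getD i 0)
                = ((L.drop (t+1)).take (i - (t+1))).count (L.getD i 0) + 1 := by
              have h1 : i - t = (i - (t+1)) + 1 := by omega
              rw [h1, hdrop, List.take_succ_cons, pvCount_cons, if_pos hv]
            rw [hcount] at hthis
            rw [hthis, if_pos hv, hv]
            constructor
            · rintro (h | h)
              · exact absurd h (by omega)
              · right
                push_cast at h ⊢
                omega
            · rintro (h | h)
              · exact absurd h (by omega)
              · right
                push_cast at h ⊢
                omega
          · have hcount : ((L.drop t).take (i - t)).count (L.getD i 0)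
                = ((L.drop (t+1)).take (i - (t+1))).count (L.getD i 0) := by
              have h1 : i - t = (i - (t+1)) + 1 := by omega
              rw [h1, hdrop, List.take_succ_cons, pvCount_cons, if_neg hv, add_zero]
            rw [hcount] at hthis
            rw [hthis, if_neg hv]
            constructor
            · rintro (h | h)
              · exact absurd h (by omega)
              · exact Or.inr h
            · rintro (h | h)
              · exact absurd h (by omega)
              · exact Or.inr h

-- ===== VERDICT (by name: the statement is the Claim_ definition above) =====
theorem compess_group_spec : Claim_equal_compess_group := by
  intro num_mem lst_mem _
  unfold Spec_compess_group compess_group compess_group_alt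
  have hinv : pvInv lst_mem 0 (List.replicate lst_mem.length false) PySem.Dict.empty := by
    refine ⟨by simp, ?_, ?_⟩
    · intro x
      simp [PySem.Dict.getD, PySem.Dict.get?, PySem.Dict.empty]
    · intro i hi
      have hrep : (List.replicate lst_mem.length false).getD i false = false := by
        simp [List.getD]
      have hempty : (PySem.Dict.empty : PySem.Dict Int Int).getD (lst_mem.getD i 0) 0
          = 0 := by
        simp [PySem.Dict.getD, PySem.Dict.get?, PySem.Dict.empty]
      rw [hrep, hempty]
      constructor
      · intro h
        exact absurd h (by simp)
      · rintro (h | h)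
        · omega
        · exfalso
          have hnn := Int.natCast_nonneg
            (((lst_mem.drop 0).take (i - 0)).count (lst_mem.getD i 0))
          omega
  have h := pvMain lst_mem lst_mem.length 0 0 (List.replicate lst_mem.length false)
    PySem.Dict.empty (by omega) hinv
  rw [List.range_eq_range', h, List.drop_zero]
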